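-- pv_equiv track=rewrite | github.com/JKottonen/Tiral-k2022-assignments | viikko-2/splitlist.py | count
-- ===== SOURCE A (Python) =====
-- def count(t):
--     greatest = t[0]
--     smallest = t[0]
--     splits = 0
--     for i in t:
--         if i > greatest:
--             greatest = i
--             splits += 1
--         if i <= smallest:
--             smallest = i
--             splits = 0
--
--
--     return splits
-- ===== SOURCE B (Python) =====
-- def count(t):
--     m = min(t)
--     L = len(t) - 1 - t[::-1].index(m)
--     gmax = max(t[:L + 1])
--     splits = 0
--     for x in t[L + 1:]:
--         if x > gmax:
--             gmax = x
--             splits += 1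
--     return splits
-- ===== Notes on version B (the rewrite author's own statement) =====
-- stated objective: alternative
-- what changed: A's single loop carrying (greatest, smallest, splits) with in-loop resets is replaced by a decomposition: locate the last occurrence of the global minimum, take the inclusive prefix max, and count strict record maxima in the remaining suffix.
-- outside the precondition, e.g. on count([]): A raises IndexError, B raises ValueError
import Mathlib
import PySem

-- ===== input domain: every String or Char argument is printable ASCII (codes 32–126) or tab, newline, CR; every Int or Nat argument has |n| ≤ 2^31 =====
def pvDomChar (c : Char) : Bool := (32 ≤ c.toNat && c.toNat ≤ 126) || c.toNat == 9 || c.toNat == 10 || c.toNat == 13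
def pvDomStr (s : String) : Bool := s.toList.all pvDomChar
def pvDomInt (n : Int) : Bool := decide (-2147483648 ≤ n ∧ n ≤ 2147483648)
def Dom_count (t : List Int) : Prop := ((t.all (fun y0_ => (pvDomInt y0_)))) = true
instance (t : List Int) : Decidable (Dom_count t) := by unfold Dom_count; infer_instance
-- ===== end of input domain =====

-- B replaces A's triple-state single loop by a decomposition: find the last occurrence of
-- the global minimum, seed a running max with the inclusive prefix max, and count strict
-- records in the suffix (objective: alternative decomposition, same cost).

-- ===== PORT A =====
def countStep (st : Int × Int × Int) (i : Int) : Int × Int × Int :=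
  let g := if st.1 < i then i else st.1
  let sp := if st.1 < i then st.2.2 + 1 else st.2.2
  if i ≤ st.2.1 then (g, i, 0) else (g, st.2.1, sp)

def count (t : List Int) : Int :=
  match t with
  | [] => 0  -- Python A raises IndexError on []; excluded by Pre_count
  | h :: _ => (List.foldl countStep (h, h, 0) t).2.2

-- ===== PORT B =====
def recStep (st : Int × Int) (x : Int) : Int × Int :=
  if st.1 < x then (x, st.2 + 1) else st

def count_alt (t : List Int) : Int :=
  match PySem.List.min? t (fun y => y) with
  | none => 0  -- Python B raises ValueError on []; excluded by Pre_count
  | some m =>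
    match PySem.List.index? ((PySem.List.slice? t none none (-1)).getD []) m with
    | none => 0  -- unreachable: m ∈ t
    | some k =>
      let L : Int := (t.length : Int) - 1 - (k : Int)
      match PySem.List.max? (PySem.List.slice t none (some (L + 1))) (fun y => y) with
      | none => 0  -- unreachable: the prefix contains m
      | some gmax =>
        (List.foldl recStep (gmax, 0) (PySem.List.slice t (some (L + 1)) none)).2

-- ===== PRECONDITION & SPEC =====
-- Pre_count excludes only the empty list, on which both Pythons raise (IndexError / ValueError).
def Pre_count (t : List Int) : Prop := t ≠ []
instance (t : List Int) : Decidable (Pre_count t) := by unfold Pre_count; infer_instance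
def pvWitness_count : List Int := [3, 1, 2]

def Spec_count (t : List Int) (out : Int) : Prop := out = count_alt t
instance (t : List Int) (out : Int) : Decidable (Spec_count t out) := by unfold Spec_count; infer_instance

-- ===== CLAIM (what is proved, stated in full; the proofs are below) =====
def Claim_equal_count : Prop := ∀ (t : List Int), Dom_count t → Pre_count t → Spec_count t (count t)

-- ===== LEMMAS AND PROOFS =====

-- taking one past a prefix grabs the prefix plus the pivot
theorem pv_take_len_succ (p : List Int) (m : Int) (q : List Int) :
    (p ++ m :: q).take (p.length + 1) = p ++ [m] := by
  induction p with
  | nil => simp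
  | cons a p ih => simp [ih]

theorem pv_drop_len_succ (p : List Int) (m : Int) (q : List Int) :
    (p ++ m :: q).drop (p.length + 1) = q := by
  induction p with
  | nil => simp
  | cons a p ih => simp [ih]

-- A's loop over a block ending with a new minimum m: records the running max, resets splits
theorem pv_Aprefix (m : Int) : ∀ (u : List Int) (g s sp : Int),
    (∀ x ∈ u, m ≤ x) → m ≤ s →
    List.foldl countStep (g, s, sp) (u ++ [m]) = ((u ++ [m]).foldl max g, m, 0) := by
  intro u
  induction u with
  | nil =>
    intro g s sp _ hs
    simp only [List.nil_append, List.foldl_cons, List.foldl_nil, countStep]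
    have : (if g < m then m else g) = max g m := by
      split_ifs <;> omega
    simp [hs, this]
  | cons a u ih =>
    intro g s sp hu hs
    have ha : m ≤ a := hu a (by simp)
    have hg1 : (countStep (g, s, sp) a).1 = max g a := by
      simp only [countStep]
      split_ifs <;> simp [max_def] <;> omega
    have hs1 : m ≤ (countStep (g, s, sp) a).2.1 := by
      simp only [countStep]
      split_ifs <;> simp <;> omega
    have := ih (countStep (g, s, sp) a).1 (countStep (g, s, sp) a).2.1
      (countStep (g, s, sp) a).2.2 (fun x hx => hu x (by simp [hx])) hs1
    calc List.foldl countStep (g, s, sp) ((a :: u) ++ [m])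
        = List.foldl countStep (countStep (g, s, sp) a) (u ++ [m]) := by simp
      _ = ((u ++ [m]).foldl max (countStep (g, s, sp) a).1, m, 0) := this
      _ = (((a :: u) ++ [m]).foldl max g, m, 0) := by rw [hg1]; simp

-- After the last minimum, no reset ever fires and A's loop is exactly B's record loop
theorem pv_Asuffix (s : Int) : ∀ (q : List Int) (g sp : Int),
    (∀ x ∈ q, s < x) →
    List.foldl countStep (g, s, sp) q
      = ((List.foldl recStep (g, sp) q).1, s, (List.foldl recStep (g, sp) q).2) := by
  intro q
  induction q with
  | nil => intro g sp _; simp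
  | cons x q ih =>
    intro g sp hq
    have hx : s < x := hq x (by simp)
    have hstep : countStep (g, s, sp) x
        = ((recStep (g, sp) x).1, s, (recStep (g, sp) x).2) := by
      simp only [countStep, recStep]
      split_ifs <;> simp_all <;> omega
    simp only [List.foldl_cons, hstep]
    exact ih _ _ (fun y hy => hq y (by simp [hy]))

-- folding max over a list headed by the seed drops the duplicate seed
theorem pv_foldl_max_self (a : Int) (u : List Int) :
    List.foldl max a (a :: u) = List.foldl max a u := by
  simp [List.foldl_cons, max_self]

theorem count_eq_core (h : Int) (r : List Int) :
    count (h :: r) = count_alt (h :: r) := by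
  have hmin : PySem.List.min? (h :: r) (fun y => y) = some (r.foldl min h) :=
    PySem.List.min?_id_cons h r
  set m := r.foldl min h with hmdef
  have hmem : m ∈ h :: r := PySem.List.min?_mem hmin
  have hle : ∀ y ∈ h :: r, m ≤ y := fun y hy => PySem.List.min?_isMin hmin y hy
  have hmemrev : m ∈ (h :: r).reverse := List.mem_reverse.mpr hmem
  obtain ⟨k, hk⟩ := Option.isSome_iff_exists.1
    ((PySem.List.index?_isSome_iff (xs := (h :: r).reverse) (v := m)).2 hmemrev)
  obtain ⟨pre, suf, hrev, hklen, hmpre⟩ := (PySem.List.index?_eq_some_iff ((h :: r).reverse) m k).1 hk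
  have h1 := congrArg List.length hrev
  simp only [List.length_reverse, List.length_append, List.length_cons] at h1
  have ht : h :: r = suf.reverse ++ m :: pre.reverse := by
    have := congrArg List.reverse hrev
    simpa using this
  set p := suf.reverse with hpdef
  set q := pre.reverse with hqdef
  have hp : ∀ x ∈ p, m ≤ x := fun x hx => hle x (by rw [ht]; simp [hx])
  have hq : ∀ x ∈ q, m < x := by
    intro x hx
    have h1 : m ≤ x := hle x (by rw [ht]; simp [hx])
    have h2 : x ≠ m := by
      intro he
      exact hmpre (by rw [← he]; simpa [hqdef, List.mem_reverse] using hx)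
    omega
  have harith : ((h :: r).length : Int) - 1 - (k : Int) + 1 = ((p.length + 1 : Nat) : Int) := by
    have h2 : p.length = suf.length := by simp [hpdef]
    simp only [List.length_cons]
    push_cast
    omega
  -- evaluate B
  simp only [count_alt, hmin, PySem.List.slice?_none_none_neg_one, Option.getD_some, hk]
  simp only [harith, PySem.List.slice_to_natCast, PySem.List.slice_from_natCast]
  rw [ht, pv_take_len_succ, pv_drop_len_succ]
  -- evaluate A
  cases hps : p with
  | nil =>
    simp only [List.nil_append]
    have hc : count (m :: q) = (List.foldl countStep (m, m, 0) (m :: q)).2.2 := rfl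
    rw [hc]
    have hstep0 : countStep (m, m, 0) m = (m, m, 0) := by simp [countStep]
    rw [List.foldl_cons, hstep0, pv_Asuffix m q m 0 hq]
    have hmax : PySem.List.max? ([m] : List Int) (fun y => y) = some m := by
      simpa using (PySem.List.max?_id_cons (x := m) (t := ([] : List Int)))
    rw [hmax]
  | cons a p' =>
    simp only [List.cons_append]
    have hc : count (a :: (p' ++ m :: q))
        = (List.foldl countStep (a, a, 0) (a :: (p' ++ m :: q))).2.2 := rfl
    rw [hc]
    have hp' : ∀ x ∈ a :: p', m ≤ x := by rw [← hps]; exact hp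
    have hsplit : a :: (p' ++ m :: q) = ((a :: p') ++ [m]) ++ q := by simp
    rw [hsplit, List.foldl_append,
        pv_Aprefix m (a :: p') a a 0 hp' (hp' a (by simp)),
        pv_Asuffix m q _ 0 hq]
    have hmax : PySem.List.max? ((a :: p') ++ [m]) (fun y => y)
        = some ((p' ++ [m]).foldl max a) := by
      simpa using (PySem.List.max?_id_cons (x := a) (t := p' ++ [m]))
    simp only [List.cons_append] at hmax ⊢
    rw [hmax]
    have h3 : ((a :: p') ++ [m]).foldl max a = (p' ++ [m]).foldl max a := by
      simp only [List.cons_append]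
      exact pv_foldl_max_self a (p' ++ [m])
    simp only [List.cons_append] at h3
    rw [h3]

-- ===== VERDICT (by name: the statement is the Claim_ definition above) =====
theorem count_spec : Claim_equal_count := by
  intro t _ hpre
  unfold Spec_count
  cases t with
  | nil => exact absurd rfl hpre
  | cons h r => exact count_eq_core h r
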